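-- pv_equiv track=rewrite | github.com/Studenecivb/CarpePy | core_functions.py | BrenthisDiemPlotDataHIs_order
-- ===== SOURCE A (Python) =====
-- def BrenthisDiemPlotDataHIs_order(BrenthisDiemPlotDataHIs_res, BrenthisDiemPlotData_res, dummyBrenthisNames):
--     his_values = BrenthisDiemPlotDataHIs_res
--     sorted_indices = sorted(range(len(his_values)), key=lambda i: his_values[i])
--     BrenthisSortedNames = [dummyBrenthisNames[i] for i in sorted_indices]
--
--     final_sorted_data = []
--     for comp in BrenthisDiemPlotData_res:
--         sorted_diem_data = [comp[i] for i in sorted_indices]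
--         final_sorted_data.append(sorted_diem_data)
--
--     return (final_sorted_data, BrenthisSortedNames)
-- ===== SOURCE B (Python) =====
-- def BrenthisDiemPlotDataHIs_order(BrenthisDiemPlotDataHIs_res, BrenthisDiemPlotData_res, dummyBrenthisNames):
--     # one record per sample: (HI value, name, bundled column of every component)
--     records = [(h, dummyBrenthisNames[j], [comp[j] for comp in BrenthisDiemPlotData_res])
--                for j, h in enumerate(BrenthisDiemPlotDataHIs_res)]
--     records.sort(key=lambda r: r[0])  # stable: ties keep original order
--     BrenthisSortedNames = [r[1] for r in records]
--     final_sorted_data = [[r[2][k] for r in records]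
--                          for k in range(len(BrenthisDiemPlotData_res))]
--     return (final_sorted_data, BrenthisSortedNames)
-- ===== Notes on version B (the rewrite author's own statement) =====
-- stated objective: alternative
-- what changed: A argsorts the index list by HI and then gathers names and each component with index lookups; B bundles each sample into one (HI, name, column) record, does a single stable sort of the records, and transposes the bundled columns back.
import Mathlib
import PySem

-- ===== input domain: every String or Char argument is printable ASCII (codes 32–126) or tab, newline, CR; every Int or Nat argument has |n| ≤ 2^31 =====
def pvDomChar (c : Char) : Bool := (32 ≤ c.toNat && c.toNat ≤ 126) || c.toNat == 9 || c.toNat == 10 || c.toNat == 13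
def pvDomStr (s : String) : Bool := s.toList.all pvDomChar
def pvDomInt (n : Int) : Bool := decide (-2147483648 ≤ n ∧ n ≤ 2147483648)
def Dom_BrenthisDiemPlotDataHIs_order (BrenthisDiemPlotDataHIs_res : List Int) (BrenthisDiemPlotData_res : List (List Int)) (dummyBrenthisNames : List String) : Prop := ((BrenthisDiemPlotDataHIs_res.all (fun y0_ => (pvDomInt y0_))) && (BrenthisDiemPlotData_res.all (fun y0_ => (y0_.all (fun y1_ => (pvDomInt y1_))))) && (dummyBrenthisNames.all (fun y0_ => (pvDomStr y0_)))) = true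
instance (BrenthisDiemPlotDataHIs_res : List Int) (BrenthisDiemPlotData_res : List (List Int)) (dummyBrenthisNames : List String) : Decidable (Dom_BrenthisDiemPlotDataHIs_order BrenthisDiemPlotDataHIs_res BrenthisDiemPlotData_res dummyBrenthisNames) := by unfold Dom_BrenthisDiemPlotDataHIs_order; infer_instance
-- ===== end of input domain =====

-- B re-decomposes A (argsort by HI, then gather each column) into one bundled record per
-- sample, a single stable sort of the records, and a transpose back; objective: alternative.

-- ===== PORT A =====
def BrenthisDiemPlotDataHIs_order (BrenthisDiemPlotDataHIs_res : List Int) (BrenthisDiemPlotData_res : List (List Int)) (dummyBrenthisNames : List String) : List (List Int) × List String :=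
  let his_values := BrenthisDiemPlotDataHIs_res
  let sorted_indices := PySem.List.sorted (PySem.List.pyRange 0 (PySem.List.len his_values)) (fun i => PySem.List.pyGetD his_values i 0)
  let brenthisSortedNames := sorted_indices.map (fun i => PySem.List.pyGetD dummyBrenthisNames i "")
  let final_sorted_data := BrenthisDiemPlotData_res.foldl
    (fun acc comp => acc ++ [sorted_indices.map (fun i => PySem.List.pyGetD comp i 0)]) []
  (final_sorted_data, brenthisSortedNames)

-- ===== PORT B =====
def BrenthisDiemPlotDataHIs_order_alt (BrenthisDiemPlotDataHIs_res : List Int) (BrenthisDiemPlotData_res : List (List Int)) (dummyBrenthisNames : List String) : List (List Int) × List String :=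
  let records := (PySem.List.enumerate BrenthisDiemPlotDataHIs_res).map
    (fun jh => (jh.2, PySem.List.pyGetD dummyBrenthisNames jh.1 "",
                BrenthisDiemPlotData_res.map (fun comp => PySem.List.pyGetD comp jh.1 0)))
  let recs := PySem.List.sorted records (fun r => r.1)
  let brenthisSortedNames := recs.map (fun r => r.2.1)
  let final_sorted_data := (PySem.List.pyRange 0 (PySem.List.len BrenthisDiemPlotData_res)).map
    (fun k => recs.map (fun r => PySem.List.pyGetD r.2.2 k 0))
  (final_sorted_data, brenthisSortedNames)

-- ===== PRECONDITION & SPEC =====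
-- Pre_ excludes exactly the inputs where Python A raises IndexError: some needed index
-- (0..len(his)-1) is out of range for dummyBrenthisNames or for a component list.
def Pre_BrenthisDiemPlotDataHIs_order (BrenthisDiemPlotDataHIs_res : List Int) (BrenthisDiemPlotData_res : List (List Int)) (dummyBrenthisNames : List String) : Prop :=
  BrenthisDiemPlotDataHIs_res.length ≤ dummyBrenthisNames.length ∧
  ∀ comp ∈ BrenthisDiemPlotData_res, BrenthisDiemPlotDataHIs_res.length ≤ comp.length
instance (BrenthisDiemPlotDataHIs_res : List Int) (BrenthisDiemPlotData_res : List (List Int)) (dummyBrenthisNames : List String) : Decidable (Pre_BrenthisDiemPlotDataHIs_order BrenthisDiemPlotDataHIs_res BrenthisDiemPlotData_res dummyBrenthisNames) := by unfold Pre_BrenthisDiemPlotDataHIs_order; infer_instance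

def pvWitness_BrenthisDiemPlotDataHIs_order : List Int × List (List Int) × List String :=
  ([2, 1], [[10, 20], [30, 40]], ["a", "b"])

def Spec_BrenthisDiemPlotDataHIs_order (BrenthisDiemPlotDataHIs_res : List Int) (BrenthisDiemPlotData_res : List (List Int)) (dummyBrenthisNames : List String) (out : List (List Int) × List String) : Prop := out = BrenthisDiemPlotDataHIs_order_alt BrenthisDiemPlotDataHIs_res BrenthisDiemPlotData_res dummyBrenthisNames
instance (BrenthisDiemPlotDataHIs_res : List Int) (BrenthisDiemPlotData_res : List (List Int)) (dummyBrenthisNames : List String) (out : List (List Int) × List String) : Decidable (Spec_BrenthisDiemPlotDataHIs_order BrenthisDiemPlotDataHIs_res BrenthisDiemPlotData_res dummyBrenthisNames out) := by unfold Spec_BrenthisDiemPlotDataHIs_order; infer_instance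

-- ===== CLAIM (what is proved, stated in full; the proofs are below) =====
def Claim_equal_BrenthisDiemPlotDataHIs_order : Prop := ∀ (BrenthisDiemPlotDataHIs_res : List Int) (BrenthisDiemPlotData_res : List (List Int)) (dummyBrenthisNames : List String), Dom_BrenthisDiemPlotDataHIs_order BrenthisDiemPlotDataHIs_res BrenthisDiemPlotData_res dummyBrenthisNames → Pre_BrenthisDiemPlotDataHIs_order BrenthisDiemPlotDataHIs_res BrenthisDiemPlotData_res dummyBrenthisNames → Spec_BrenthisDiemPlotDataHIs_order BrenthisDiemPlotDataHIs_res BrenthisDiemPlotData_res dummyBrenthisNames (BrenthisDiemPlotDataHIs_order BrenthisDiemPlotDataHIs_res BrenthisDiemPlotData_res dummyBrenthisNames)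

-- ===== LEMMAS AND PROOFS =====

-- insertBy commutes with a map that the comparison factors through
theorem pv_insertBy_map {α β : Type} (g : α → β) (before : α → α → Bool) (before' : β → β → Bool)
    (h : ∀ a b, before' (g a) (g b) = before a b) (x : α) :
    ∀ ys : List α, PySem.List.insertBy before' (g x) (ys.map g) = (PySem.List.insertBy before x ys).map g
  | [] => by simp [PySem.List.insertBy]
  | y :: ys => by
      simp only [List.map_cons, PySem.List.insertBy, h]
      by_cases hb : before x y
      · simp [hb]
      · simp [hb, pv_insertBy_map g before before' h x ys]

theorem pv_foldl_insertBy_map {α β : Type} (g : α → β) (before : α → α → Bool) (before' : β → β → Bool)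
    (h : ∀ a b, before' (g a) (g b) = before a b) :
    ∀ (xs : List α) (acc : List α),
    List.foldl (fun acc x => PySem.List.insertBy before' x acc) (acc.map g) (xs.map g)
      = (List.foldl (fun acc x => PySem.List.insertBy before x acc) acc xs).map g
  | [], acc => by simp
  | x :: xs, acc => by
      simp only [List.map_cons, List.foldl_cons]
      rw [pv_insertBy_map g before before' h x acc]
      exact pv_foldl_insertBy_map g before before' h xs _

-- Python's stable sort commutes with a map when the key factors through the map
theorem pv_sorted_map {α β κ : Type} [LT κ] [DecidableLT κ] (g : α → β) (key : β → κ) (xs : List α) :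
    PySem.List.sorted (xs.map g) key = (PySem.List.sorted xs (fun x => key (g x))).map g := by
  rw [PySem.List.sorted_eq_foldl_insertBy, PySem.List.sorted_eq_foldl_insertBy]
  simpa using pv_foldl_insertBy_map g
    (fun a b => decide (key (g a) < key (g b))) (fun a b => decide (key a < key b))
    (fun a b => rfl) xs []

-- mapping over enumerate(xs, s) is mapping over the index range, reading xs[i-s]
theorem pv_enumerate_map {β : Type} (G : Int × Int → β) :
    ∀ (xs : List Int) (s : Int),
    (PySem.List.enumerate xs s).map G
      = (PySem.List.pyRange s (s + xs.length)).map (fun i => G (i, PySem.List.pyGetD xs (i - s) 0))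
  | [], s => by simp [PySem.List.pyRange_one_eq_nil (le_refl s)]
  | x :: xs, s => by
      rw [PySem.List.enumerate_cons, List.map_cons,
          PySem.List.pyRange_one_cons (show s < s + (((x :: xs).length : Nat) : Int) by simp only [List.length_cons]; push_cast; omega),
          List.map_cons]
      refine congrArg₂ List.cons ?_ ?_
      · simp [PySem.List.pyGetD_zero_cons]
      · rw [pv_enumerate_map G xs (s + 1)]
        have hr : (s + 1) + ((xs.length : Nat) : Int) = s + (((x :: xs).length : Nat) : Int) := by
          simp only [List.length_cons]; push_cast; omega
        rw [hr]
        refine List.map_congr_left ?_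
        intro i hi
        rcases PySem.List.mem_pyRange_one.mp hi with ⟨hlo, hhi⟩
        have hhi' : i < s + ((xs.length : Nat) : Int) + 1 := by omega
        have h0 : (0:Int) ≤ i - (s + 1) := by omega
        have h1 : i - (s + 1) < ((xs.length : Nat) : Int) := by omega
        have h0b : (0:Int) ≤ i - s := by omega
        have h1b : i - s < (((x :: xs).length : Nat) : Int) := by simp only [List.length_cons]; push_cast; omega
        rw [PySem.List.pyGetD_eq_getElem xs 0 h0 h1, PySem.List.pyGetD_eq_getElem (x :: xs) 0 h0b h1b]
        have ht : (i - s).toNat = (i - (s + 1)).toNat + 1 := by omega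
        simp [ht]

-- indexing the bundled column list is indexing the component then the sample
theorem pv_getD_bundle (data : List (List Int)) (k i : Int) :
    PySem.List.pyGetD (data.map (fun comp => PySem.List.pyGetD comp i 0)) k 0
      = PySem.List.pyGetD (PySem.List.pyGetD data k []) i 0 := by
  have hz : PySem.List.pyGetD ([] : List Int) i 0 = 0 := by
    simp [PySem.List.pyGetD, PySem.List.pyGet?]
  have h := PySem.List.pyGetD_map (fun comp => PySem.List.pyGetD comp i 0) data k []
  rw [hz] at h
  simpa using h

-- mapping a function of the k-th row over range(len(data)) is mapping it over data
theorem pv_transpose {β : Type} (data : List (List Int)) (G : List Int → β) :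
    (PySem.List.pyRange 0 ((data.length : Nat) : Int)).map (fun k => G (PySem.List.pyGetD data k []))
      = data.map G := by
  rw [show (fun k => G (PySem.List.pyGetD data k [])) = G ∘ (fun k => PySem.List.pyGetD data k []) from rfl,
      ← List.map_map, PySem.List.map_pyGetD_pyRange_zero']

-- the two ports agree on every input (defaults included)
theorem pv_main (his : List Int) (data : List (List Int)) (names : List String) :
    BrenthisDiemPlotDataHIs_order his data names = BrenthisDiemPlotDataHIs_order_alt his data names := by
  simp only [BrenthisDiemPlotDataHIs_order, BrenthisDiemPlotDataHIs_order_alt]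
  rw [pv_enumerate_map]
  simp only [sub_zero, zero_add]
  rw [show (fun i => (fun jh : Int × Int =>
        (jh.2, PySem.List.pyGetD names jh.1 "",
         data.map (fun comp => PySem.List.pyGetD comp jh.1 0))) (i, PySem.List.pyGetD his i 0))
      = (fun i => (PySem.List.pyGetD his i 0, PySem.List.pyGetD names i "",
         data.map (fun comp => PySem.List.pyGetD comp i 0))) from rfl]
  rw [pv_sorted_map (fun i => (PySem.List.pyGetD his i 0, PySem.List.pyGetD names i "",
        data.map (fun comp => PySem.List.pyGetD comp i 0))) (fun r => r.1)]
  rw [PySem.List.foldl_append_singleton_eq_map]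
  simp only [List.map_map, Function.comp_def, List.nil_append, PySem.List.len_eq]
  refine Prod.ext ?_ rfl
  simp only [pv_getD_bundle]
  exact (pv_transpose data _).symm

-- ===== VERDICT (by name: the statement is the Claim_ definition above) =====
theorem BrenthisDiemPlotDataHIs_order_spec : Claim_equal_BrenthisDiemPlotDataHIs_order := by
  intro his data names _hdom _hpre
  exact pv_main his data names
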